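-- pv_equiv track=rewrite | github.com/BramAlkema/svg2pptx | tests/support/coverage_analyzer.py | _analyze_missing_patterns
-- ===== SOURCE A (Python) =====
-- from typing import Dict, List, Set, Tuple, Optional, Any
--
-- def _analyze_missing_patterns(module_path: str, missing_lines: List[int]) -> Dict[str, Any]:
--     """Analyze patterns in missing coverage."""
--     patterns = {
--         'error_handling': 0,
--         'edge_cases': 0,
--         'main_logic': 0,
--         'initialization': 0
--     }
--
--     # This would require parsing the actual module to categorize missing lines
--     # For now, return a simple analysis
--     consecutive_gaps = []
--     if missing_lines:
--         current_gap = [missing_lines[0]]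
--         for line in missing_lines[1:]:
--             if line == current_gap[-1] + 1:
--                 current_gap.append(line)
--             else:
--                 consecutive_gaps.append(current_gap)
--                 current_gap = [line]
--         consecutive_gaps.append(current_gap)
--
--     patterns['consecutive_gaps'] = len(consecutive_gaps)
--     patterns['largest_gap'] = max(len(gap) for gap in consecutive_gaps) if consecutive_gaps else 0
--     patterns['isolated_lines'] = sum(1 for gap in consecutive_gaps if len(gap) == 1)
--
--     return patterns
-- ===== SOURCE B (Python) =====
-- from typing import Dict, List, Any
--
-- def _analyze_missing_patterns(module_path: str, missing_lines: List[int]) -> Dict[str, Any]: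
--     """Single pass over adjacent pairs, keeping numeric counters only (no list of groups)."""
--     gaps = 0
--     largest = 0
--     isolated = 0
--     if missing_lines:
--         cur = 1
--         for prev, line in zip(missing_lines, missing_lines[1:]):
--             if line == prev + 1:
--                 cur += 1
--             else:
--                 gaps += 1
--                 if cur > largest:
--                     largest = cur
--                 if cur == 1:
--                     isolated += 1
--                 cur = 1
--         gaps += 1
--         if cur > largest:
--             largest = cur
--         if cur == 1:
--             isolated += 1
--     return {
--         'error_handling': 0,
--         'edge_cases': 0,
--         'main_logic': 0,
--         'initialization': 0,
--         'consecutive_gaps': gaps,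
--         'largest_gap': largest,
--         'isolated_lines': isolated,
--     }
-- ===== Notes on version B (the rewrite author's own statement) =====
-- stated objective: faster
-- what changed: B replaces A's construction of a list of consecutive-run lists followed by three aggregate passes (len/max/sum) with a single pass over adjacent pairs maintaining four integer counters and never materialising the groups.
import Mathlib
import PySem

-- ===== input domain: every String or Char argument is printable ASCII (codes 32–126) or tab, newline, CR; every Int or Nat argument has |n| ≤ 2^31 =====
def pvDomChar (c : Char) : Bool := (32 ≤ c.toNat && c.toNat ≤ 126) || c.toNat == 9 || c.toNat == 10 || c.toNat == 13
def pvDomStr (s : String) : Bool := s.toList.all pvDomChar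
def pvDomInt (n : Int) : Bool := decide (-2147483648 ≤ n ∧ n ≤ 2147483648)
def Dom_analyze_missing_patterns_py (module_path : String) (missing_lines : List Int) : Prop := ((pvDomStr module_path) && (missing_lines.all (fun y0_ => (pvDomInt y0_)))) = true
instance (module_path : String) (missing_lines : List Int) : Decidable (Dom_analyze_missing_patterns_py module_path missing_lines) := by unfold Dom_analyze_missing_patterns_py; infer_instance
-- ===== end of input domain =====

-- B computes the same run statistics in one pass over adjacent pairs with integer counters instead of building A's list of run lists and aggregating it in three passes (objective: faster, measured).

-- ===== PORT A =====
-- loop body: current_gap is always nonempty, so current_gap[-1] is its last element (getLast?.getD 0 is exact here)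
def aStep (st : List (List Int) × List Int) (line : Int) : List (List Int) × List Int :=
  if line == st.2.getLast?.getD 0 + 1 then (st.1, st.2 ++ [line])
  else (st.1 ++ [st.2], [line])

def analyze_missing_patterns_py (module_path : String) (missing_lines : List Int) : List (String × Int) :=
  let consecutive_gaps : List (List Int) :=
    match missing_lines with
    | [] => []
    | h :: t =>
      let st := t.foldl aStep ([], [h])
      st.1 ++ [st.2]
  -- max(len(gap) for gap in consecutive_gaps) if consecutive_gaps else 0
  let lens := consecutive_gaps.map (fun g => (g.length : Int))
  let largest : Int := match lens with | [] => 0 | x :: r => r.foldl max x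
  let isolated : Int := consecutive_gaps.foldl (fun a g => if g.length == 1 then a + 1 else a) 0
  [("error_handling", 0), ("edge_cases", 0), ("main_logic", 0), ("initialization", 0),
   ("consecutive_gaps", (consecutive_gaps.length : Int)),
   ("largest_gap", largest),
   ("isolated_lines", isolated)]

-- ===== PORT B =====
-- state: (gaps, largest, isolated, cur)
def bStep (st : Int × Int × Int × Int) (p : Int × Int) : Int × Int × Int × Int :=
  if p.2 == p.1 + 1 then (st.1, st.2.1, st.2.2.1, st.2.2.2 + 1)
  else (st.1 + 1, if st.2.2.2 > st.2.1 then st.2.2.2 else st.2.1,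
        st.2.2.1 + (if st.2.2.2 == 1 then 1 else 0), 1)

def analyze_missing_patterns_py_alt (module_path : String) (missing_lines : List Int) : List (String × Int) :=
  let res : Int × Int × Int :=
    match missing_lines with
    | [] => (0, 0, 0)
    | _ :: _ =>
      let st := (List.zip missing_lines (missing_lines.drop 1)).foldl bStep (0, 0, 0, 1)
      (st.1 + 1, if st.2.2.2 > st.2.1 then st.2.2.2 else st.2.1,
       st.2.2.1 + (if st.2.2.2 == 1 then 1 else 0))
  [("error_handling", 0), ("edge_cases", 0), ("main_logic", 0), ("initialization", 0),
   ("consecutive_gaps", res.1),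
   ("largest_gap", res.2.1),
   ("isolated_lines", res.2.2)]

-- ===== PRECONDITION & SPEC =====
def Spec_analyze_missing_patterns_py (module_path : String) (missing_lines : List Int) (out : List (String × Int)) : Prop := out = analyze_missing_patterns_py_alt module_path missing_lines
instance (module_path : String) (missing_lines : List Int) (out : List (String × Int)) : Decidable (Spec_analyze_missing_patterns_py module_path missing_lines out) := by unfold Spec_analyze_missing_patterns_py; infer_instance

-- ===== CLAIM (what is proved, stated in full; the proofs are below) =====
def Claim_equal_analyze_missing_patterns_py : Prop := ∀ (module_path : String) (missing_lines : List Int), Dom_analyze_missing_patterns_py module_path missing_lines → Spec_analyze_missing_patterns_py module_path missing_lines (analyze_missing_patterns_py module_path missing_lines)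

-- ===== LEMMAS AND PROOFS =====

def isoCount (done : List (List Int)) : Int :=
  done.foldl (fun a g => if g.length == 1 then a + 1 else a) 0

def maxLen (done : List (List Int)) : Int :=
  (done.map (fun g => (g.length : Int))).foldl max 0

lemma isoCount_append (done : List (List Int)) (cur : List Int) :
    isoCount (done ++ [cur]) = isoCount done + (if cur.length == 1 then 1 else 0) := by
  simp [isoCount, List.foldl_append]
  split <;> simp

lemma maxLen_append (done : List (List Int)) (cur : List Int) :
    maxLen (done ++ [cur]) = max (maxLen done) (cur.length : Int) := by
  simp [maxLen, List.foldl_append]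

-- the main loop invariant: B's counters track A's (done, cur) state
lemma loop_inv (t : List Int) : ∀ (prev : Int) (done : List (List Int)) (cur : List Int),
    cur.getLast? = some prev →
    (List.zip (prev :: t) t).foldl bStep ((done.length : Int), maxLen done, isoCount done, (cur.length : Int))
      = (((t.foldl aStep (done, cur)).1.length : Int), maxLen (t.foldl aStep (done, cur)).1,
         isoCount (t.foldl aStep (done, cur)).1, ((t.foldl aStep (done, cur)).2.length : Int)) := by
  induction t with
  | nil => intro prev done cur _; simp
  | cons b t ih =>
    intro prev done cur hlast
    have hzip : List.zip (prev :: b :: t) (b :: t) = (prev, b) :: List.zip (b :: t) t := rfl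
    by_cases hb : b = prev + 1
    · have h1 : bStep ((done.length : Int), maxLen done, isoCount done, (cur.length : Int)) (prev, b)
          = ((done.length : Int), maxLen done, isoCount done, ((cur ++ [b]).length : Int)) := by
        simp [bStep, hb]
      rw [List.foldl_cons, show aStep (done, cur) b = (done, cur ++ [b]) by simp [aStep, hlast, hb],
          hzip, List.foldl_cons, h1]
      exact ih b done (cur ++ [b]) (by simp)
    · have h1 : bStep ((done.length : Int), maxLen done, isoCount done, (cur.length : Int)) (prev, b)
          = (((done ++ [cur]).length : Int), maxLen (done ++ [cur]), isoCount (done ++ [cur]),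
             (([b] : List Int).length : Int)) := by
        simp only [bStep, maxLen_append, isoCount_append]
        simp [hb]
        rw [max_def]; split_ifs <;> omega
      rw [List.foldl_cons, show aStep (done, cur) b = (done ++ [cur], [b]) by simp [aStep, hlast, hb],
          hzip, List.foldl_cons, h1]
      exact ih b (done ++ [cur]) [b] (by simp)

-- for a list of nonnegative heads, Python's max-of-nonempty equals the 0-seeded fold
lemma foldl_max_head (x : Int) (r : List Int) (hx : 0 ≤ x) :
    r.foldl max x = (x :: r).foldl max 0 := by
  simp [List.foldl_cons, max_eq_right hx]

lemma maxLen_nonempty (done : List (List Int)) (cur : List Int) :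
    (match (done ++ [cur]).map (fun g => (g.length : Int)) with
      | [] => (0 : Int) | x :: r => r.foldl max x) = maxLen (done ++ [cur]) := by
  cases hm : (done ++ [cur]).map (fun g => (g.length : Int)) with
  | nil => simp at hm
  | cons x r =>
    have hx : 0 ≤ x := by
      have : x ∈ (done ++ [cur]).map (fun g => (g.length : Int)) := by rw [hm]; simp
      obtain ⟨g, _, hg⟩ := List.mem_map.mp this
      simp [← hg]
    simp only [maxLen, hm]
    rw [foldl_max_head x r hx]

-- ===== VERDICT (by name: the statement is the Claim_ definition above) =====
theorem analyze_missing_patterns_py_spec : Claim_equal_analyze_missing_patterns_py := by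
  intro module_path missing_lines _
  unfold Spec_analyze_missing_patterns_py
  cases missing_lines with
  | nil => rfl
  | cons h t =>
    unfold analyze_missing_patterns_py analyze_missing_patterns_py_alt
    simp only [List.drop_succ_cons, List.drop_zero]
    have hinv := loop_inv t h [] [h] (by simp)
    norm_num [isoCount, maxLen] at hinv
    simp only [hinv]
    have hmax := maxLen_nonempty (t.foldl aStep ([], [h])).1 (t.foldl aStep ([], [h])).2
    have hmaxapp := maxLen_append (t.foldl aStep ([], [h])).1 (t.foldl aStep ([], [h])).2
    have hiso := isoCount_append (t.foldl aStep ([], [h])).1 (t.foldl aStep ([], [h])).2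
    simp only [List.cons.injEq, Prod.mk.injEq, and_true, true_and]
    refine ⟨by simp, ?_, ?_⟩
    · rw [hmax, hmaxapp]
      simp only [maxLen]
      rw [max_def]; split_ifs <;> omega
    · rcases eq_or_ne (t.foldl aStep ([], [h])).2.length 1 with hc | hc <;>
        simp only [isoCount] at hiso <;> simp [hc] at hiso ⊢
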